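-- pv_equiv track=rewrite | github.com/kapokyue/patrol-skills | skills/patrol-doc/scripts/build_corpus.py | section_ranges
-- ===== SOURCE A (Python) =====
-- def section_ranges(headings: list[tuple[str, int]], max_line: int) -> dict[int, tuple[int, int]]:
--     heading_lines = [line for _, line in headings]
--     ranges: dict[int, tuple[int, int]] = {}
--     for start in heading_lines:
--         next_lines = [line for line in heading_lines if line > start]
--         end = min(next_lines) - 1 if next_lines else max_line
--         ranges[start] = (start, end)
--     return ranges
-- ===== SOURCE B (Python) =====
-- def _next_map(uniq, max_line):
--     # successor-minus-one for each sorted unique line; last maps to max_line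
--     nxt = {}
--     for a, b in zip(uniq, uniq[1:]):
--         nxt[a] = b - 1
--     if uniq:
--         nxt[uniq[-1]] = max_line
--     return nxt
--
-- def section_ranges(headings: list[tuple[str, int]], max_line: int) -> dict[int, tuple[int, int]]:
--     lines = [line for _, line in headings]
--     nxt = _next_map(sorted(set(lines)), max_line)
--     ranges: dict[int, tuple[int, int]] = {}
--     for line in lines:
--         if line not in ranges:
--             ranges[line] = (line, nxt[line])
--     return ranges
-- ===== Notes on version B (the rewrite author's own statement) =====
-- stated objective: faster
-- what changed: Instead of scanning all heading lines again for each heading to find the next one (quadratic), B sorts the distinct heading lines once and builds a successor-minus-one map by zipping the sorted list with its tail, then fills the result dict in one pass over the headings.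
import Mathlib
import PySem

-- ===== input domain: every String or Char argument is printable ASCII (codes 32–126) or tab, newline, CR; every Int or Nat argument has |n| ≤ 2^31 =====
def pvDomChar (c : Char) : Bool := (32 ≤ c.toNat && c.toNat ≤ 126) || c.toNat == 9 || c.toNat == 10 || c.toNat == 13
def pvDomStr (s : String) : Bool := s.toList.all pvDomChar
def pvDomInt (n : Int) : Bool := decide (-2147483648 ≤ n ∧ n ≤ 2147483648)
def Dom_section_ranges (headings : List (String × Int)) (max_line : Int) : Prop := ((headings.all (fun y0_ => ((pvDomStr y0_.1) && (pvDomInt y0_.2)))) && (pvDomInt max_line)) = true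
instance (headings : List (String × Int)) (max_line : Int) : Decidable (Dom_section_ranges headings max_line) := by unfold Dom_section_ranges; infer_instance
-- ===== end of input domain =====

-- B replaces A's per-heading scan over all headings by sorting the distinct
-- heading lines once and pairing each with its successor (objective: faster).

-- ===== PORT A =====
def section_ranges (headings : List (String × Int)) (max_line : Int) : List (Int × Int × Int) :=
  let heading_lines := headings.map (fun p => p.2)
  let ranges := heading_lines.foldl (fun r start =>
    let next_lines := heading_lines.filter (fun line => start < line)
    let e := match PySem.List.min? next_lines (fun x => x) with
      | some m => m - 1
      | none => max_line
    r.insert start (start, e)) PySem.Dict.empty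
  ranges.items

-- ===== PORT B =====
-- helper = Source B's _next_map: successor-minus-one dict over the sorted unique lines
def nextMap (uniq : List Int) (max_line : Int) : PySem.Dict Int Int :=
  let nxt := (uniq.zip (uniq.drop 1)).foldl (fun d p => d.insert p.1 (p.2 - 1)) PySem.Dict.empty
  match uniq.getLast? with
  | some a => nxt.insert a max_line
  | none => nxt

def section_ranges_alt (headings : List (String × Int)) (max_line : Int) : List (Int × Int × Int) :=
  let lines := headings.map (fun p => p.2)
  let nxt := nextMap (PySem.List.sorted (PySem.Set.ofList lines) (fun x => x) false) max_line
  let ranges := lines.foldl (fun r line =>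
    if r.contains line = true then r else r.insert line (line, nxt.getD line 0)) PySem.Dict.empty
  ranges.items

-- ===== PRECONDITION & SPEC =====
def Spec_section_ranges (headings : List (String × Int)) (max_line : Int) (out : List (Int × Int × Int)) : Prop := out = section_ranges_alt headings max_line
instance (headings : List (String × Int)) (max_line : Int) (out : List (Int × Int × Int)) : Decidable (Spec_section_ranges headings max_line out) := by unfold Spec_section_ranges; infer_instance

-- ===== CLAIM (what is proved, stated in full; the proofs are below) =====
def Claim_equal_section_ranges : Prop := ∀ (headings : List (String × Int)) (max_line : Int), Dom_section_ranges headings max_line → Spec_section_ranges headings max_line (section_ranges headings max_line)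

-- ===== LEMMAS AND PROOFS =====

-- A's per-heading end value, as a function of the key only
def endA (lines : List Int) (max_line : Int) (l : Int) : Int :=
  match PySem.List.min? (lines.filter (fun y => l < y)) (fun x => x) with
  | some m => m - 1
  | none => max_line

theorem insert_eq_self_of_val (d : PySem.Dict Int (Int × Int)) (k : Int) (v : Int × Int)
    (hc : d.contains k = true) (hinv : ∀ p ∈ d.items, p.1 = k → p.2 = v) :
    d.insert k v = d := by
  apply PySem.Dict.ext
  rw [PySem.Dict.items_insert_of_contains d v hc]
  conv_rhs => rw [← List.map_id d.items]
  apply List.map_congr_left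
  intro p hp
  by_cases hk : p.1 = k
  · have hv := hinv p hp hk
    cases p
    simp_all
  · simp [hk]

-- inserting a key-determined value repeatedly = inserting it only when the key is fresh
theorem fold_eq_guard (f : Int → Int × Int) (xs : List Int) (d : PySem.Dict Int (Int × Int))
    (hinv : ∀ p ∈ d.items, p.2 = f p.1) :
    xs.foldl (fun r l => r.insert l (f l)) d
      = xs.foldl (fun r l => if r.contains l = true then r else r.insert l (f l)) d := by
  induction xs generalizing d with
  | nil => rfl
  | cons x t ih =>
    rw [List.foldl_cons, List.foldl_cons]
    by_cases hc : d.contains x = true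
    · rw [if_pos hc, insert_eq_self_of_val d x (f x) hc (fun p hp hk => hk ▸ hinv p hp)]
      exact ih d hinv
    · rw [if_neg hc]
      apply ih
      intro p hp
      rcases (PySem.Dict.mem_items_insert _ _ _ _).mp hp with h | ⟨h, _⟩
      · rw [h]
      · exact hinv p h

-- the two guarded folds agree when the inserted values agree on members
theorem guard_fold_congr (f g : Int → Int × Int) (xs : List Int) (d : PySem.Dict Int (Int × Int))
    (h : ∀ l ∈ xs, f l = g l) :
    xs.foldl (fun r l => if r.contains l = true then r else r.insert l (f l)) d
      = xs.foldl (fun r l => if r.contains l = true then r else r.insert l (g l)) d := by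
  induction xs generalizing d with
  | nil => rfl
  | cons x t ih =>
    rw [List.foldl_cons, List.foldl_cons, h x (List.mem_cons_self ..)]
    exact ih _ (fun l hl => h l (List.mem_cons_of_mem _ hl))

theorem getD_zipfold_not_key (xs : List (Int × Int)) (d : PySem.Dict Int Int) (k : Int)
    (h : ∀ p ∈ xs, p.1 ≠ k) :
    (xs.foldl (fun r p => r.insert p.1 (p.2 - 1)) d).getD k 0 = d.getD k 0 := by
  induction xs generalizing d with
  | nil => rfl
  | cons x t ih =>
    rw [List.foldl_cons, ih _ (fun p hp => h p (List.mem_cons_of_mem _ hp)),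
      PySem.Dict.getD_insert_of_ne _ _ _ (fun he => h x (List.mem_cons_self ..) he.symm)]

theorem getD_zipfold_base (xs : List (Int × Int)) (d d' : PySem.Dict Int Int) (k : Int)
    (h : d.getD k 0 = d'.getD k 0) :
    (xs.foldl (fun r p => r.insert p.1 (p.2 - 1)) d).getD k 0
      = (xs.foldl (fun r p => r.insert p.1 (p.2 - 1)) d').getD k 0 := by
  induction xs generalizing d d' with
  | nil => exact h
  | cons x t ih =>
    rw [List.foldl_cons, List.foldl_cons]
    apply ih
    rw [PySem.Dict.getD_insert, PySem.Dict.getD_insert]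
    split_ifs with hk
    · rfl
    · exact h

-- keys of the zip of a list with its tail lie in the tail
theorem zip_fst_mem (u t' : List Int) (p : Int × Int) (hp : p ∈ u.zip t') : p.1 ∈ u := by
  exact (List.of_mem_zip hp).1

theorem nextMap_eq_last (u : List Int) (M k : Int) (hk : u.getLast? = some k) :
    nextMap u M
      = ((u.zip (u.drop 1)).foldl (fun d p => d.insert p.1 (p.2 - 1)) PySem.Dict.empty).insert k M := by
  rw [nextMap, hk]

-- core: the successor dict looks up exactly A's end value
theorem comb (u : List Int) (lines : List Int) (M : Int)
    (hp : u.Pairwise (· < ·)) (l : Int) (hl : l ∈ u)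
    (hA : ∀ y ∈ lines, l < y → y ∈ u) (hB : ∀ y ∈ u, y ∈ lines) :
    (nextMap u M).getD l 0 = endA lines M l := by
  induction u generalizing l with
  | nil => cases hl
  | cons a u' ih =>
    cases u' with
    | nil =>
      -- u = [a]; l = a is the last heading: end = max_line
      have hla : l = a := by simpa using hl
      subst l
      have hfil : lines.filter (fun y => a < y) = [] := by
        apply List.filter_eq_nil_iff.mpr
        intro y hy
        simp only [decide_eq_true_eq]
        intro hlt
        have : y = a := by simpa using hA y hy hlt
        omega
      simp [nextMap, endA, hfil, PySem.Dict.getD_insert_self, PySem.List.min?]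
    | cons b t =>
      have hab : a < b := (List.pairwise_cons.mp hp).1 b (List.mem_cons_self ..)
      have hlast : (a :: b :: t).getLast? = (b :: t).getLast? := List.getLast?_cons_cons ..
      obtain ⟨k, hk⟩ : ∃ k, (b :: t).getLast? = some k := by
        cases hgl : (b :: t).getLast? with
        | none => exact absurd (List.getLast?_eq_none_iff.mp hgl) (by simp)
        | some k => exact ⟨k, rfl⟩
      have hkmem : k ∈ b :: t := List.mem_of_getLast? hk
      have hzip : (a :: b :: t).zip ((a :: b :: t).drop 1) = (a, b) :: (b :: t).zip t := by
        simp [List.zip_cons_cons]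
      by_cases hla : l = a
      · -- l = a has successor b
        subst l
        have hmem_gt : ∀ y ∈ b :: t, a < y := (List.pairwise_cons.mp hp).1
        have hlk : a ≠ k := by have := hmem_gt k hkmem; omega
        have hLHS : (nextMap (a :: b :: t) M).getD a 0 = b - 1 := by
          rw [nextMap_eq_last _ _ _ (hlast.trans hk)]
          rw [PySem.Dict.getD_insert_of_ne _ _ _ hlk, hzip, List.foldl_cons]
          rw [getD_zipfold_not_key _ _ _ (fun p hp' => by
            have := hmem_gt p.1 (zip_fst_mem _ _ p hp')
            omega)]
          rw [PySem.Dict.getD_insert_self]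
        rw [hLHS]
        -- min of the lines after a is b
        have hbf : b ∈ lines.filter (fun y => a < y) := by
          rw [List.mem_filter]
          exact ⟨hB b (by simp), by simpa using hab⟩
        cases hmin : PySem.List.min? (lines.filter (fun y => a < y)) (fun x => x) with
        | none =>
          rw [PySem.List.min?_eq_none_iff] at hmin
          rw [hmin] at hbf
          cases hbf
        | some m =>
          have hmf := PySem.List.min?_mem hmin
          rw [List.mem_filter] at hmf
          have hm1 : m ∈ lines := hmf.1
          have hm2 : a < m := by simpa using hmf.2
          have hmb : m ≤ b := PySem.List.min?_isMin hmin b hbf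
          have hbm : b ≤ m := by
            have hmu : m ∈ a :: b :: t := hA m hm1 hm2
            rcases List.mem_cons.mp hmu with hmu | hmu
            · omega
            · rcases List.mem_cons.mp hmu with hmu | hmu
              · omega
              · have := (List.pairwise_cons.mp (List.pairwise_cons.mp hp).2).1 m hmu
                omega
          have : m = b := le_antisymm hmb hbm
          subst this
          simp [endA, hmin]
      · -- l is in the tail: reduce to nextMap (b :: t)
        have hl' : l ∈ b :: t := by
          rcases List.mem_cons.mp hl with h | h
          · exact absurd h hla
          · exact h
        have hal : a < l := (List.pairwise_cons.mp hp).1 l hl'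
        have hLHS : (nextMap (a :: b :: t) M).getD l 0 = (nextMap (b :: t) M).getD l 0 := by
          rw [nextMap_eq_last _ _ _ (hlast.trans hk), nextMap_eq_last _ _ _ hk]
          rw [PySem.Dict.getD_insert, PySem.Dict.getD_insert]
          have hfold : ((a :: b :: t).zip ((a :: b :: t).drop 1)).foldl
                (fun d p => d.insert p.1 (p.2 - 1)) PySem.Dict.empty
              = ((b :: t).zip t).foldl (fun d p => d.insert p.1 (p.2 - 1))
                (PySem.Dict.empty.insert a (b - 1)) := by
            rw [hzip, List.foldl_cons]
          have hdrop : ((b :: t).zip ((b :: t).drop 1)) = (b :: t).zip t := by simp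
          split_ifs with hkk
          · rfl
          · rw [hfold, hdrop]
            apply getD_zipfold_base
            rw [PySem.Dict.getD_insert_of_ne _ _ _ (by omega : l ≠ a)]
        rw [hLHS]
        apply ih (List.pairwise_cons.mp hp).2 l hl'
        · intro y hy hly
          have hyu := hA y hy hly
          rcases List.mem_cons.mp hyu with h | h
          · omega
          · exact h
        · intro y hy
          exact hB y (List.mem_cons_of_mem _ hy)

-- ===== VERDICT (by name: the statement is the Claim_ definition above) =====
theorem section_ranges_spec : Claim_equal_section_ranges := by
  intro headings M _
  unfold Spec_section_ranges section_ranges section_ranges_alt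
  simp only
  set lines := headings.map (fun p => p.2) with hlines
  congr 1
  have hshape : (lines.foldl (fun r start =>
      let next_lines := lines.filter (fun line => start < line)
      let e := match PySem.List.min? next_lines (fun x => x) with
        | some m => m - 1
        | none => M
      r.insert start (start, e)) PySem.Dict.empty)
      = lines.foldl (fun r l => r.insert l (l, endA lines M l)) PySem.Dict.empty := by
    simp only [endA]
  rw [hshape, fold_eq_guard _ _ _ (by simp [PySem.Dict.empty])]
  apply guard_fold_congr
  intro l hl
  have hu := PySem.List.sorted_ofList_pairwise_lt lines
  have hlu : l ∈ PySem.List.sorted (PySem.Set.ofList lines) (fun x => x) false := by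
    rw [PySem.List.mem_sorted, PySem.Set.mem_ofList]; exact hl
  rw [comb _ lines M hu l hlu]
  · intro y hy _
    rw [PySem.List.mem_sorted, PySem.Set.mem_ofList]; exact hy
  · intro y hy
    rw [PySem.List.mem_sorted, PySem.Set.mem_ofList] at hy; exact hy
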